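-- pv_equiv track=rewrite | github.com/zizudana/python-for-coding-test | 프로그래머스/Lv2/방금그곡.py | new_music
-- ===== SOURCE A (Python) =====
-- def new_music(music): # 소문자로 바꾸기
-- 	tmp = ""
-- 	i = 0
-- 	while i+1 < len(music):
-- 		if music[i+1] == "#":
-- 			tmp += music[i].lower()
-- 			i += 1
-- 		else:
-- 			tmp += music[i]
-- 		i += 1
-- 	if i == len(music)-1:
-- 		tmp += music[i]
-- 	return tmp
-- ===== SOURCE B (Python) =====
-- import re
--
--
-- def new_music(music):
--     return re.sub(r'(?s)(.)#', lambda m: m.group(1).lower(), music)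
-- ===== Notes on version B (the rewrite author's own statement) =====
-- stated objective: idiomatic
-- what changed: Replaced the manual index-based while loop with quadratic string accumulation by a single regex substitution that lowercases each character immediately followed by a sharp sign.
import Mathlib
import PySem

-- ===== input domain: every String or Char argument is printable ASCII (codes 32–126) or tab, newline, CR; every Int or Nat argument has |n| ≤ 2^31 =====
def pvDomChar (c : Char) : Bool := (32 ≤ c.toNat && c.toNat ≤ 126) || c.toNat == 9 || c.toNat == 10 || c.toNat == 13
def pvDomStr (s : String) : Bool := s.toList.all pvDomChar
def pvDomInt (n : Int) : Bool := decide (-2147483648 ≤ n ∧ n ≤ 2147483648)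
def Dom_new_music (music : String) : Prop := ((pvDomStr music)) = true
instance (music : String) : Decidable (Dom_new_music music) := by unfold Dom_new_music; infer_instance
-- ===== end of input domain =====

-- B replaces A's manual index loop by one regex substitution re.sub(r'(?s)(.)#', …) (idiomatic); same return value.

-- ===== PORT A =====
-- A's while loop: index i, accumulator tmp; the trailing `if i == len-1` is compared over Int (Python's len-1 can be -1).
def pvLoopA (cs : List Char) (i : Nat) (tmp : List Char) : List Char :=
  if h : i + 1 < cs.length then
    if cs[i+1]'h = '#' then
      pvLoopA cs (i+2) (tmp ++ [PySem.Chars.lowerChar (cs[i]'(by omega))])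
    else
      pvLoopA cs (i+1) (tmp ++ [cs[i]'(by omega)])
  else if h2 : (i : Int) = (cs.length : Int) - 1 then
    tmp ++ [cs[i]'(by omega)]
  else tmp
termination_by cs.length - i
decreasing_by all_goals omega

def new_music (music : String) : String := String.ofList (pvLoopA music.toList 0 [])

-- ===== PORT B =====
-- B is re.sub(r'(?s)(.)#', lower-of-group-1, music): the regex engine's left-to-right
-- non-overlapping scan, transcribed directly: any char followed by '#' is replaced by
-- its lowercase (consuming both), anything else is copied unchanged.
def pvScanB : List Char → List Char
  | [] => []
  | [c] => [c]
  | c :: d :: rest =>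
    if d = '#' then PySem.Chars.lowerChar c :: pvScanB rest
    else c :: pvScanB (d :: rest)

def new_music_alt (music : String) : String := String.ofList (pvScanB music.toList)

-- ===== PRECONDITION & SPEC =====
def Spec_new_music (music : String) (out : String) : Prop := out = new_music_alt music
instance (music : String) (out : String) : Decidable (Spec_new_music music out) := by unfold Spec_new_music; infer_instance

-- ===== CLAIM (what is proved, stated in full; the proofs are below) =====
def Claim_equal_new_music : Prop := ∀ (music : String), Dom_new_music music → Spec_new_music music (new_music music)

-- ===== LEMMAS AND PROOFS =====

theorem pvLoopA_eq (cs : List Char) (i : Nat) (tmp : List Char) :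
    pvLoopA cs i tmp = tmp ++ pvScanB (cs.drop i) := by
  induction' hn : cs.length - i using Nat.strong_induction_on with n ih generalizing i tmp
  rw [pvLoopA]
  by_cases h : i + 1 < cs.length
  · have hi : i < cs.length := by omega
    have hd : cs.drop i = cs[i] :: cs[i+1] :: cs.drop (i+2) := by
      rw [List.drop_eq_getElem_cons hi, List.drop_eq_getElem_cons h]
    by_cases hc : cs[i+1] = '#'
    · simp only [h, hc, dif_pos, if_pos]
      rw [ih (cs.length - (i+2)) (by omega) (i+2) _ rfl, hd, hc, pvScanB]
      simp
    · simp only [h, hc, dif_pos, if_neg, not_false_iff]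
      rw [ih (cs.length - (i+1)) (by omega) (i+1) _ rfl,
          List.drop_eq_getElem_cons hi, List.drop_eq_getElem_cons h, pvScanB]
      simp [hc]
  · simp only [dif_neg h]
    by_cases h2 : (i : Int) = (cs.length : Int) - 1
    · have hi : i < cs.length := by omega
      have : cs.drop i = [cs[i]] := by
        rw [List.drop_eq_getElem_cons hi]
        have : cs.drop (i+1) = [] := List.drop_eq_nil_of_le (by omega)
        rw [this]
      simp [h2, this, pvScanB]
    · have : cs.drop i = [] := List.drop_eq_nil_of_le (by omega)
      simp [h2, this, pvScanB]

-- ===== VERDICT (by name: the statement is the Claim_ definition above) =====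
theorem new_music_spec : Claim_equal_new_music := by
  intro music _
  unfold Spec_new_music new_music new_music_alt
  rw [pvLoopA_eq]
  simp
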